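-- pv_equiv track=rewrite | github.com/The404Studios/Archimation | ai-control/daemon/trust_translate.py | pe_gate_to_kernel
-- ===== SOURCE A (Python) =====
-- from typing import Final
--
-- PE_GATE_MIN: Final[int] = 5
--
-- PE_GATE_MAX: Final[int] = 90
--
-- PE_GATE_ANCHORS: Final[dict[int, int]] = {
--     5:   -500,   # public/unsigned PE — anyone load
--     30:    50,   # user-scoped PE
--     60:   400,   # service-scoped PE
--     80:   700,   # admin-scoped PE
--     90:  1000,   # kernel/signed PE
-- }
--
-- _PE_GATE_SORTED: Final[tuple[int, ...]] = tuple(sorted(PE_GATE_ANCHORS))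
--
-- def _clamp(value: int, lo: int, hi: int) -> int:
--     """Clamp an ``int`` into ``[lo, hi]`` inclusive."""
--     if value < lo:
--         return lo
--     if value > hi:
--         return hi
--     return value
--
-- def _require_int(name: str, value: object) -> int:
--     """Reject non-integer inputs with a ``TypeError``.
--
--     Accepts ``bool`` grudgingly (it is an ``int`` subclass in Python) but
--     rejects ``float`` because silent truncation is how Session 41's bugs
--     started in the first place.
--     """
--     if isinstance(value, bool):
--         # bool is int, but we want a clear-cut integer caller.
--         return int(value)
--     if isinstance(value, int):
--         return value
--     raise TypeError(
--         f"trust_translate: {name!r} must be int, got {type(value).__name__}"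
--     )
--
-- def pe_gate_to_kernel(gate: int) -> int:
--     """Translate a PE-loader gate level to the kernel trust score floor.
--
--     The PE loader uses gate values in ``[PE_GATE_MIN, PE_GATE_MAX]``;
--     each anchor in ``PE_GATE_ANCHORS`` maps to the kernel trust score
--     a subject must have for a DLL of that tier to be linked.  Off-anchor
--     inputs floor down to the nearest defined anchor (monotonic).
--
--     Returns:
--         Kernel trust score floor in
--         ``[KERNEL_SCORE_MIN, KERNEL_SCORE_MAX]``.
--
--     Raises:
--         TypeError: if ``gate`` is not an integer.
--     """
--     g = _require_int("gate", gate)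
--     g = _clamp(g, PE_GATE_MIN, PE_GATE_MAX)
--     if g in PE_GATE_ANCHORS:
--         return PE_GATE_ANCHORS[g]
--     floor_anchor = PE_GATE_MIN
--     for a in _PE_GATE_SORTED:
--         if a <= g:
--             floor_anchor = a
--         else:
--             break
--     return PE_GATE_ANCHORS[floor_anchor]
-- ===== SOURCE B (Python) =====
-- PE_GATE_MIN = 5
-- PE_GATE_MAX = 90
--
-- PE_GATE_ANCHORS = {
--     5:   -500,
--     30:    50,
--     60:   400,
--     80:   700,
--     90:  1000,
-- }
--
-- _PE_GATE_SORTED = tuple(sorted(PE_GATE_ANCHORS))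
--
--
-- def pe_gate_to_kernel(gate: int) -> int:
--     """Translate a PE-loader gate level to the kernel trust score floor.
--
--     Binary search for the greatest anchor <= clamped gate (exact hits
--     included), instead of an exact-match branch plus a left-to-right scan.
--     """
--     if isinstance(gate, bool):
--         g = int(gate)
--     elif isinstance(gate, int):
--         g = gate
--     else:
--         raise TypeError(
--             f"trust_translate: 'gate' must be int, got {type(gate).__name__}"
--         )
--     g = min(max(g, PE_GATE_MIN), PE_GATE_MAX)
--     lo, hi = 0, len(_PE_GATE_SORTED) - 1
--     while lo < hi:
--         mid = (lo + hi + 1) // 2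
--         if _PE_GATE_SORTED[mid] <= g:
--             lo = mid
--         else:
--             hi = mid - 1
--     return PE_GATE_ANCHORS[_PE_GATE_SORTED[lo]]
-- ===== Notes on version B (the rewrite author's own statement) =====
-- stated objective: idiomatic
-- what changed: Replaced the exact-match dict membership branch plus a left-to-right linear scan over the sorted anchors with a single binary search (greatest anchor <= clamped gate), and the two-branch _clamp with min/max.
import Mathlib
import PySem

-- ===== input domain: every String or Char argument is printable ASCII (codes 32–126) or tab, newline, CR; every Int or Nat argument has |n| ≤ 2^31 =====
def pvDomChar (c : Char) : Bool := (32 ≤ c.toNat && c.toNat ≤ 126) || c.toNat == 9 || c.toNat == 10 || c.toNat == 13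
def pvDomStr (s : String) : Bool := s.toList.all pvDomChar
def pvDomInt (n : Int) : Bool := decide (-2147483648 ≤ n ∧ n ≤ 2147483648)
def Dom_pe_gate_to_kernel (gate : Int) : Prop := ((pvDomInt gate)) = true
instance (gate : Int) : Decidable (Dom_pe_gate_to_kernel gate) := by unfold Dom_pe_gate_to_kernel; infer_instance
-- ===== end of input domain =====

-- B replaces A's exact-match branch plus linear scan with one binary search for the
-- greatest anchor ≤ the clamped gate (idiomatic; same result; the table is tiny, no speed claim).

-- ===== PORT A =====
-- PE_GATE_ANCHORS as an insertion-order association list (dict[int,int])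
def pvAnchors : PySem.Dict Int Int := PySem.Dict.ofList [(5, -500), (30, 50), (60, 400), (80, 700), (90, 1000)]
-- _PE_GATE_SORTED = tuple(sorted(PE_GATE_ANCHORS))
def pvSorted : List Int := [5, 30, 60, 80, 90]
-- _clamp, literal two-branch version
def pvClamp (value lo hi : Int) : Int :=
  if value < lo then lo else if value > hi then hi else value
-- the for-loop over _PE_GATE_SORTED with break, carrying floor_anchor
def pvFloorLoop : List Int → Int → Int → Int
  | [], fa, _ => fa
  | a :: rest, fa, g => if a ≤ g then pvFloorLoop rest a g else fa

def pe_gate_to_kernel (gate : Int) : Int :=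
  -- _require_int: gate is an Int here, so the `isinstance(value, int)` branch returns it
  let g := gate
  let g := pvClamp g 5 90
  if (PySem.Dict.get? pvAnchors g).isSome then
    (PySem.Dict.get? pvAnchors g).getD 0   -- key present: lookup cannot raise
  else
    let fa := pvFloorLoop pvSorted 5 g
    (PySem.Dict.get? pvAnchors fa).getD 0  -- fa is always an anchor: lookup cannot raise

-- ===== PORT B =====
-- while lo < hi binary search; fuel = list length bounds the iterations (hi - lo shrinks each step)
def pvBSearch (xs : List Int) (g : Int) : Int → Int → Nat → Int
  | lo, _, 0 => lo
  | lo, hi, fuel + 1 =>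
    if lo < hi then
      let mid := PySem.Int.floordiv (lo + hi + 1) 2
      if (PySem.List.pyGet? xs mid).getD 0 ≤ g then  -- mid always in range for 0 ≤ lo ≤ mid ≤ hi < len
        pvBSearch xs g mid hi fuel
      else
        pvBSearch xs g lo (mid - 1) fuel
    else lo

def pe_gate_to_kernel_alt (gate : Int) : Int :=
  let g := gate
  let g := min (max g 5) 90
  let lo := pvBSearch pvSorted g 0 (5 - 1) 5
  (PySem.Dict.get? pvAnchors ((PySem.List.pyGet? pvSorted lo).getD 0)).getD 0

-- ===== PRECONDITION & SPEC =====
def Spec_pe_gate_to_kernel (gate : Int) (out : Int) : Prop := out = pe_gate_to_kernel_alt gate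
instance (gate : Int) (out : Int) : Decidable (Spec_pe_gate_to_kernel gate out) := by unfold Spec_pe_gate_to_kernel; infer_instance

-- ===== CLAIM (what is proved, stated in full; the proofs are below) =====
def Claim_equal_pe_gate_to_kernel : Prop := ∀ (gate : Int), Dom_pe_gate_to_kernel gate → Spec_pe_gate_to_kernel gate (pe_gate_to_kernel gate)

-- ===== LEMMAS AND PROOFS =====
-- both programs depend on gate only through the clamped value, and the two clamps agree
def pvCoreA (g : Int) : Int :=
  if (PySem.Dict.get? pvAnchors g).isSome then
    (PySem.Dict.get? pvAnchors g).getD 0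
  else
    (PySem.Dict.get? pvAnchors (pvFloorLoop pvSorted 5 g)).getD 0

def pvCoreB (g : Int) : Int :=
  (PySem.Dict.get? pvAnchors ((PySem.List.pyGet? pvSorted (pvBSearch pvSorted g 0 (5 - 1) 5)).getD 0)).getD 0

theorem pvA_factor (gate : Int) : pe_gate_to_kernel gate = pvCoreA (pvClamp gate 5 90) := rfl

theorem pvB_factor (gate : Int) : pe_gate_to_kernel_alt gate = pvCoreB (min (max gate 5) 90) := rfl

theorem pvClamp_eq_minmax (g : Int) : pvClamp g 5 90 = min (max g 5) 90 := by
  unfold pvClamp; split_ifs <;> omega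

theorem pvClamp_bounds (g : Int) : 5 ≤ pvClamp g 5 90 ∧ pvClamp g 5 90 ≤ 90 := by
  unfold pvClamp; split_ifs <;> omega

theorem pvCore_eq (c : Int) (h1 : 5 ≤ c) (h2 : c ≤ 90) : pvCoreA c = pvCoreB c := by
  interval_cases c <;> decide

-- ===== VERDICT (by name: the statement is the Claim_ definition above) =====
theorem pe_gate_to_kernel_spec : Claim_equal_pe_gate_to_kernel := by
  intro gate _
  unfold Spec_pe_gate_to_kernel
  rw [pvA_factor, pvB_factor, ← pvClamp_eq_minmax]
  exact pvCore_eq _ (pvClamp_bounds gate).1 (pvClamp_bounds gate).2
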